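-- pv_equiv track=rewrite | github.com/ShSeanLee/Side-Projects | CAPTCHA_OCR/WOL.py | deleter
-- ===== SOURCE A (Python) =====
-- def deleter(l):
--     new = [l[0]]
--
--     for i in range(1, len(l)):
--         if l[i] == '':
--             new.append(l[i])
--         elif l[i] != new[-1]:
--             new.append(l[i])
--     return ''.join(new)
-- ===== SOURCE B (Python) =====
-- def deleter(l):
--     # Run-length view: every skipped element of A equals the last kept one, and empty
--     # strings contribute nothing to the join, so the result is one copy of each run key.
--     parts = []
--     i = 0
--     n = len(l)
--     while i < n:
--         run = l[i]
--         j = i + 1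
--         while j < n and l[j] == run:
--             j += 1
--         parts.append(run)
--         i = j
--     return ''.join(parts)
-- ===== Notes on version B (the rewrite author's own statement) =====
-- stated objective: alternative
-- what changed: B is a two-pointer run-skipper: it scans each maximal run of equal elements with an inner loop and emits one copy of each run key, using the fact that empty strings contribute nothing to the join, instead of A's element-by-element comparison against the accumulated output's last element.
import Mathlib
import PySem

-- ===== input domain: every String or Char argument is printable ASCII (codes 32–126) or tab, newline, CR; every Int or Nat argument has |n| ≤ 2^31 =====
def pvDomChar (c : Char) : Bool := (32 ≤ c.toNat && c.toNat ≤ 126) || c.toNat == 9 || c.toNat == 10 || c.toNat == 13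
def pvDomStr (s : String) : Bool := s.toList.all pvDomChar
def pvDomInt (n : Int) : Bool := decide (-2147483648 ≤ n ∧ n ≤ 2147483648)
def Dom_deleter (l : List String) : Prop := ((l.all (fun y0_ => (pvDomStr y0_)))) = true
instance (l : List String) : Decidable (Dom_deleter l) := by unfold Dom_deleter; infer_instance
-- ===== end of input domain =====

-- B replaces A's accumulator-with-last-kept comparison by a two-pointer run skipper that
-- emits one copy of each maximal run (empties join to nothing): an alternative, same O(n).
-- Pre_ excludes only the empty list, on which A raises IndexError (l[0]).


-- ===== PORT A =====
-- new = [l[0]]; for i in range(1, len(l)): append if l[i]=='' or l[i]!=new[-1]; ''.join(new)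
def deleter (l : List String) : String :=
  match l with
  | [] => ""          -- unreachable: Python raises IndexError on l[0]; excluded by Pre_
  | x :: rest =>
    let new := (PySem.List.pyRange 1 ((x :: rest).length : Int) 1).foldl
      (fun new i =>
        let li := PySem.List.pyGetD (x :: rest) i ""
        if li = "" then new ++ [li]
        else if li ≠ PySem.List.pyGetD new (-1) "" then new ++ [li] else new)
      [x]
    PySem.Str.join "" new

-- ===== PORT B =====
-- inner while: advance j past the elements equal to the run key (j := i+1; while l[j]==run: j+=1)
def pvSkipRun (run : String) : List String → List String
  | [] => []
  | y :: ys => if y = run then pvSkipRun run ys else y :: ys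

theorem pvSkipRun_length_le (run : String) (ys : List String) :
    (pvSkipRun run ys).length ≤ ys.length := by
  induction ys with
  | nil => simp [pvSkipRun]
  | cons y ys ih =>
    simp only [pvSkipRun]
    split_ifs
    · exact le_trans ih (Nat.le_succ _)
    · simp

-- outer while: parts.append(run); i := j  (the list from position i onward is the state)
def pvRuns : List String → List String
  | [] => []
  | x :: xs => x :: pvRuns (pvSkipRun x xs)
termination_by l => l.length
decreasing_by simpa using Nat.lt_succ_of_le (pvSkipRun_length_le x xs)

def deleter_alt (l : List String) : String :=
  PySem.Str.join "" (pvRuns l)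

-- ===== PRECONDITION & SPEC =====
-- A evaluates l[0] first, so it raises IndexError exactly on the empty list.
def Pre_deleter (l : List String) : Prop := l ≠ []
instance (l : List String) : Decidable (Pre_deleter l) := by unfold Pre_deleter; infer_instance
def pvWitness_deleter : List String := ["a", "a", "", "b"]

def Spec_deleter (l : List String) (out : String) : Prop := out = deleter_alt l
instance (l : List String) (out : String) : Decidable (Spec_deleter l out) := by unfold Spec_deleter; infer_instance

-- ===== CLAIM (what is proved, stated in full; the proofs are below) =====
def Claim_equal_deleter : Prop := ∀ (l : List String), Dom_deleter l → Pre_deleter l → Spec_deleter l (deleter l)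

-- ===== LEMMAS AND PROOFS =====

-- the elements A keeps from `rest`, each compared with its input predecessor (`prev` for the head)
def pvKept (prev : String) : List String → List String
  | [] => []
  | b :: bs => if b = "" ∨ b ≠ prev then b :: pvKept b bs else pvKept b bs

theorem pvGetD_last (acc : List String) (b : String) :
    PySem.List.pyGetD (acc ++ [b]) (-1) "" = b := by
  simp [PySem.List.pyGetD, PySem.List.pyGet?, PySem.List.pyIdx?]

theorem pvFold_eq (rest : List String) : ∀ (prev : String) (acc : List String),
    PySem.List.pyGetD acc (-1) "" = prev →
    rest.foldl
      (fun new li =>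
        if li = "" then new ++ [li]
        else if li ≠ PySem.List.pyGetD new (-1) "" then new ++ [li] else new)
      acc
    = acc ++ pvKept prev rest := by
  induction rest with
  | nil => intro prev acc _; simp [pvKept]
  | cons b bs ih =>
    intro prev acc h
    simp only [List.foldl_cons, pvKept]
    by_cases hb : b = ""
    · rw [if_pos hb, ih b _ (pvGetD_last acc b)]
      simp [hb]
    · rw [if_neg hb, h]
      by_cases hne : b ≠ prev
      · rw [if_pos hne, ih b _ (pvGetD_last acc b)]
        simp [hb, hne]
      · rw [if_neg hne]
        push Not at hne
        subst hne
        rw [ih b acc h]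
        simp [hb]

theorem pvJoin_cons (x : String) (ys : List String) :
    PySem.Str.join "" (x :: ys) = x ++ PySem.Str.join "" ys := by
  cases ys with
  | nil => simp [PySem.Str.join, PySem.Chars.join_singleton, PySem.Chars.join_nil]
  | cons y ys => simp [PySem.Str.join, PySem.Chars.join_cons_cons]

-- A's kept list and B's run keys have the same join (empties join to nothing)
theorem pvKept_join_eq_runs (rest : List String) : ∀ (prev : String),
    PySem.Str.join "" (pvKept prev rest)
      = PySem.Str.join "" (pvRuns (pvSkipRun prev rest)) := by
  induction rest with
  | nil => intro prev; simp [pvKept, pvSkipRun, pvRuns]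
  | cons b bs ih =>
    intro prev
    simp only [pvKept, pvSkipRun]
    by_cases heq : b = prev
    · subst heq
      by_cases hb : b = ""
      · subst hb
        rw [if_pos (Or.inl rfl), if_pos rfl, pvJoin_cons]
        simpa using ih ""
      · rw [if_neg (by simp [hb]), if_pos rfl]
        exact ih b
    · rw [if_pos (Or.inr heq), if_neg heq, pvRuns, pvJoin_cons, pvJoin_cons]
      rw [ih b]

-- ===== VERDICT (by name: the statement is the Claim_ definition above) =====
theorem deleter_spec : Claim_equal_deleter := by
  intro l _ hpre
  unfold Spec_deleter deleter deleter_alt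
  match l with
  | [] => exact absurd rfl hpre
  | x :: rest =>
    simp only
    have h := PySem.List.foldl_pyRange_pyGetD' (xs := x :: rest) (a := 1) (d := "")
      (f := fun new li =>
        if li = "" then new ++ [li]
        else if li ≠ PySem.List.pyGetD new (-1) "" then new ++ [li] else new)
      (init := [x]) (by norm_num)
    rw [h]
    simp only [Int.toNat_one, List.drop_succ_cons, List.drop_zero]
    rw [pvFold_eq rest x [x] (by simp [PySem.List.pyGetD, PySem.List.pyGet?, PySem.List.pyIdx?])]
    simp only [List.singleton_append]
    rw [pvRuns, pvJoin_cons, pvJoin_cons, pvKept_join_eq_runs rest x]
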